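-- pv_equiv track=rewrite | github.com/msharara1998/numbers-sum-solver | backend/utils.py | get_essential_values_with_counts
-- ===== SOURCE A (Python) =====
-- from collections import Counter
--
-- def get_essential_values_with_counts(
--     combos: list[list[int]], available_values: list[int]
-- ) -> dict[int, int]:
--     """
--     Analyze combinations to find essential values that must be selected.
--
--     A value is considered essential if:
--     1. It appears with the SAME frequency in ALL combinations, AND
--     2. That frequency equals the number of available instances
--
--     This handles the edge case where duplicate values exist (e.g., three 5s)
--     but only some are needed (e.g., [5, 5] for sum 10). In such cases, we
--     cannot determine which specific instances to select, so the value is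
--     NOT marked as essential.
--
--     Args:
--         combos: List of all possible combinations that satisfy the constraint.
--         available_values: List of available values (can contain duplicates).
--
--     Returns:
--         Dictionary mapping essential values to their required count.
--         Only values that appear in ALL combos with the same count AND
--         where that count equals available instances are included.
--
--     Example:
--         >>> combos = [[5, 5], [5, 5]]
--         >>> available_values = [5, 5]
--         >>> get_essential_values_with_counts(combos, available_values)
--         {5: 2}  # Both 5s are essential
--
--         >>> combos = [[5, 5]]
--         >>> available_values = [5, 5, 5]
--         >>> get_essential_values_with_counts(combos, available_values)
--         {}  # Not essential - we have 3 but only need 2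
--     """
--
--     if not combos:
--         return {}
--
--     # Get all possible values that appear in any combo
--     all_numbers = set().union(*combos)
--
--     # Count how many times each value appears in available_values
--     available_counts = Counter(available_values)
--
--     # For each combo, count the frequency of each value
--     combo_counters = [Counter(combo) for combo in combos]
--
--     # Find values that appear with the SAME frequency in ALL combos
--     # and where that frequency equals the available count
--     essential_values_with_counts = {}
--     for value in all_numbers:
--         # Get the count of this value in each combo
--         counts_in_combos = [counter.get(value, 0) for counter in combo_counters]
--
--         # Check if all combos have the same count for this value
--         if len(set(counts_in_combos)) == 1:
--             # All combos have the same count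
--             required_count = counts_in_combos[0]
--
--             # Only mark as essential if we need ALL available instances
--             if required_count > 0 and required_count == available_counts[value]:
--                 essential_values_with_counts[value] = required_count
--
--     return essential_values_with_counts
-- ===== SOURCE B (Python) =====
-- from collections import Counter
--
-- def get_essential_values_with_counts(
--     combos: list[list[int]], available_values: list[int]
-- ) -> dict[int, int]:
--     """Single aggregating pass: for each value track the count seen in the
--     first combo containing it, how many combos contain it, and whether every
--     combo that contains it agrees on that count."""
--     if not combos:
--         return {}
--     # value -> [first_count, combos_containing_value, consistent]
--     state: dict[int, list] = {}
--     for combo in combos: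
--         for value, c in Counter(combo).items():
--             st = state.get(value)
--             if st is None:
--                 state[value] = [c, 1, True]
--             else:
--                 st[1] += 1
--                 if st[0] != c:
--                     st[2] = False
--     n = len(combos)
--     avail = Counter(available_values)
--     return {
--         value: st[0]
--         for value, st in state.items()
--         if st[2] and st[1] == n and st[0] == avail[value]
--     }
-- ===== Notes on version B (the rewrite author's own statement) =====
-- stated objective: faster
-- what changed: Instead of scanning every combo counter once per distinct value (values x combos passes), B makes one aggregating pass over the combos, keeping per value its first-seen count, the number of combos containing it and a consistency flag, then filters once.
import Mathlib
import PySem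

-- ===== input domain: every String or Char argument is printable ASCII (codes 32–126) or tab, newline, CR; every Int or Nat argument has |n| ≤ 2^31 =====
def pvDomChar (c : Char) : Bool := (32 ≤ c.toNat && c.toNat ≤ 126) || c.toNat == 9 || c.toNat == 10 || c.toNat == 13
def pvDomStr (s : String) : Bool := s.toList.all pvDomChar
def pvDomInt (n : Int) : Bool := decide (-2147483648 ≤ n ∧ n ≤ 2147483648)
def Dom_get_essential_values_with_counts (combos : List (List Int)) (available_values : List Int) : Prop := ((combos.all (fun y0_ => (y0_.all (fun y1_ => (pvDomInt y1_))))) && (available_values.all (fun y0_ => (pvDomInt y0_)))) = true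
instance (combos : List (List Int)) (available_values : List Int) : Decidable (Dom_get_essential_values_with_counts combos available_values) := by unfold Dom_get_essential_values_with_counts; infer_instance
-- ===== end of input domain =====

-- B replaces A's per-distinct-value scan over all combo counters by one aggregating
-- pass over the combos (per value: first count, combos containing it, consistency flag).
-- The equivalence is about the returned dict as an item list; Python's hash iteration
-- order over `all_numbers` is modelled as first-insertion order (the dict value is
-- order-independent as a dict).

-- ===== PORT A =====
def get_essential_values_with_counts (combos : List (List Int)) (available_values : List Int) : List (Int × Int) :=
  if combos = [] then []
  else
    -- all_numbers = set().union(*combos)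
    let all_numbers : PySem.Set Int := combos.foldl (fun s c => PySem.Set.update s c) PySem.Set.empty
    let available_counts : PySem.Dict Int Int := PySem.Dict.counter available_values
    let combo_counters : List (PySem.Dict Int Int) := combos.map PySem.Dict.counter
    let essential : PySem.Dict Int Int := all_numbers.foldl (fun acc value =>
      let counts_in_combos : List Int := combo_counters.map (fun c => c.getD value 0)
      if PySem.Set.len (PySem.Set.ofList counts_in_combos) == 1 then
        -- counts_in_combos[0]: nonempty because combos ≠ [] on this branch
        let required_count : Int := counts_in_combos.headD 0
        if required_count > 0 && required_count == available_counts.getD value 0 then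
          acc.insert value required_count
        else acc
      else acc) PySem.Dict.empty
    essential.items

-- ===== PORT B =====
def get_essential_values_with_counts_alt (combos : List (List Int)) (available_values : List Int) : List (Int × Int) :=
  if combos = [] then []
  else
    -- state: value -> (first_count, combos_containing_value, consistent)
    let state : PySem.Dict Int (Int × Int × Bool) := combos.foldl (fun st combo =>
      (PySem.Dict.counter combo).items.foldl (fun st vc =>
        match st.get? vc.1 with
        | none => st.insert vc.1 (vc.2, 1, true)
        | some st0 => st.insert vc.1 (st0.1, st0.2.1 + 1, st0.2.2 && (st0.1 == vc.2))) st) PySem.Dict.empty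
    let n : Int := combos.length
    let avail : PySem.Dict Int Int := PySem.Dict.counter available_values
    state.items.foldl (fun acc it =>
      if it.2.2.2 && it.2.2.1 == n && it.2.1 == avail.getD it.1 0 then acc ++ [(it.1, it.2.1)]
      else acc) []

-- ===== PRECONDITION & SPEC =====
def Spec_get_essential_values_with_counts (combos : List (List Int)) (available_values : List Int) (out : List (Int × Int)) : Prop := out = get_essential_values_with_counts_alt combos available_values
instance (combos : List (List Int)) (available_values : List Int) (out : List (Int × Int)) : Decidable (Spec_get_essential_values_with_counts combos available_values out) := by unfold Spec_get_essential_values_with_counts; infer_instance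

-- ===== CLAIM (what is proved, stated in full; the proofs are below) =====
def Claim_equal_get_essential_values_with_counts : Prop := ∀ (combos : List (List Int)) (available_values : List Int), Dom_get_essential_values_with_counts combos available_values → Spec_get_essential_values_with_counts combos available_values (get_essential_values_with_counts combos available_values)

-- ===== LEMMAS AND PROOFS =====

-- proof-side names for B's loops
def pvInner (st : PySem.Dict Int (Int × Int × Bool)) (vc : Int × Int) : PySem.Dict Int (Int × Int × Bool) :=
  match st.get? vc.1 with
  | none => st.insert vc.1 (vc.2, 1, true)
  | some st0 => st.insert vc.1 (st0.1, st0.2.1 + 1, st0.2.2 && (st0.1 == vc.2))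

def pvUpd (o : Option (Int × Int × Bool)) (w : Int) : Option (Int × Int × Bool) :=
  match o with
  | none => some (w, 1, true)
  | some st0 => some (st0.1, st0.2.1 + 1, st0.2.2 && (st0.1 == w))

def pvOuter (st : PySem.Dict Int (Int × Int × Bool)) (combo : List Int) : PySem.Dict Int (Int × Int × Bool) :=
  (PySem.Dict.counter combo).items.foldl pvInner st

def pvState (cs : List (List Int)) : PySem.Dict Int (Int × Int × Bool) :=
  cs.foldl pvOuter PySem.Dict.empty

-- the counts of v in the combos that contain v, in order
def pvOcc (combos : List (List Int)) (v : Int) : List Int :=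
  (combos.filter (fun c => decide (v ∈ c))).map (fun c => (c.count v : Int))

def pvStSpec (occ : List Int) : Option (Int × Int × Bool) :=
  match occ with
  | [] => none
  | h :: t => some (h, 1 + t.length, t.all (fun x => h == x))

lemma pvInner_get?_ne (ps : List (Int × Int)) (st : PySem.Dict Int (Int × Int × Bool)) (v : Int)
    (h : v ∉ ps.map Prod.fst) : (ps.foldl pvInner st).get? v = st.get? v := by
  induction ps generalizing st with
  | nil => rfl
  | cons p ps ih =>
    simp only [List.map_cons, List.mem_cons, not_or] at h
    rw [List.foldl_cons, ih _ h.2]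
    unfold pvInner
    cases st.get? p.1 <;> simp [PySem.Dict.get?_insert_of_ne _ _ h.1]

lemma pvInner_get?_mem (ps : List (Int × Int)) (st : PySem.Dict Int (Int × Int × Bool)) (v w : Int)
    (hnd : (ps.map Prod.fst).Nodup) (hm : (v, w) ∈ ps) :
    (ps.foldl pvInner st).get? v = pvUpd (st.get? v) w := by
  induction ps generalizing st with
  | nil => simp at hm
  | cons p ps ih =>
    simp only [List.map_cons, List.nodup_cons] at hnd
    rcases List.mem_cons.mp hm with h | h
    · subst h
      rw [List.foldl_cons, pvInner_get?_ne _ _ _ hnd.1]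
      unfold pvInner pvUpd
      cases st.get? v <;> simp [PySem.Dict.get?_insert_self]
    · have hne : v ≠ p.1 := by
        intro e; exact hnd.1 (e ▸ (List.mem_map.mpr ⟨(v, w), h, rfl⟩))
      rw [List.foldl_cons, ih _ hnd.2 h]
      unfold pvInner
      cases st.get? p.1 <;> simp [PySem.Dict.get?_insert_of_ne _ _ hne]

lemma pvStSpec_append (occ : List Int) (x : Int) :
    pvStSpec (occ ++ [x]) = pvUpd (pvStSpec occ) x := by
  cases occ with
  | nil => rfl
  | cons h t => simp [pvStSpec, pvUpd]; omega

lemma pvOcc_append (cs : List (List Int)) (c : List Int) (v : Int) :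
    pvOcc (cs ++ [c]) v =
      if v ∈ c then pvOcc cs v ++ [(c.count v : Int)] else pvOcc cs v := by
  unfold pvOcc
  rw [List.filter_append]
  by_cases h : v ∈ c <;> simp [h]

lemma pvState_get? (cs : List (List Int)) (v : Int) :
    (pvState cs).get? v = pvStSpec (pvOcc cs v) := by
  induction cs using List.reverseRecOn with
  | nil => simp [pvState, pvOcc, pvStSpec, PySem.Dict.get?_empty]
  | append_singleton cs c ih =>
    unfold pvState at ih ⊢
    rw [List.foldl_append, List.foldl_cons, List.foldl_nil]
    unfold pvOuter at ih ⊢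
    rw [pvOcc_append]
    have hitems : (PySem.Dict.counter c).items.map Prod.fst = PySem.Set.ofList c := by
      simp [PySem.Dict.items_counter, List.map_map, Function.comp_def]
    by_cases hv : v ∈ c
    · have hmem : (v, (c.count v : Int)) ∈ (PySem.Dict.counter c).items := by
        rw [PySem.Dict.items_counter]
        exact List.mem_map.mpr ⟨v, (PySem.Set.mem_ofList _ _).mpr hv, rfl⟩
      rw [pvInner_get?_mem _ _ _ _ (by rw [hitems]; exact PySem.Set.nodup_ofList c) hmem, ih,
        if_pos hv, pvStSpec_append]
    · have hnm : v ∉ (PySem.Dict.counter c).items.map Prod.fst := by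
        rw [hitems]; exact fun h => hv ((PySem.Set.mem_ofList _ _).mp (hitems ▸ h))
      rw [pvInner_get?_ne _ _ _ hnm, ih, if_neg hv]

lemma pvF_eq : pvInner = fun (st : PySem.Dict Int (Int × Int × Bool)) (vc : Int × Int) =>
    st.insert vc.1 (match st.get? vc.1 with
      | none => (vc.2, 1, true)
      | some st0 => (st0.1, st0.2.1 + 1, st0.2.2 && (st0.1 == vc.2))) := by
  funext st vc
  unfold pvInner
  cases st.get? vc.1 <;> rfl

lemma pvUpdate_ofList (s : PySem.Set Int) (xs : List Int) :
    PySem.Set.update s (PySem.Set.ofList xs) = PySem.Set.update s xs := by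
  rw [PySem.Set.update_eq_append_filter, PySem.Set.update_eq_append_filter, PySem.Set.ofList_ofList]

lemma pvFoldl_update (cs : List (List Int)) (s : PySem.Set Int) :
    cs.foldl (fun s c => PySem.Set.update s c) s = PySem.Set.update s cs.flatten := by
  induction cs generalizing s with
  | nil => simp [PySem.Set.update]
  | cons c cs ih => rw [List.foldl_cons, ih, List.flatten_cons, PySem.Set.update_append]

lemma pvAllN_eq (cs : List (List Int)) :
    cs.foldl (fun s c => PySem.Set.update s c) PySem.Set.empty = PySem.Set.ofList cs.flatten := by
  rw [pvFoldl_update]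
  exact PySem.Set.update_nil_left _

lemma pvState_keys (cs : List (List Int)) :
    (pvState cs).keys = PySem.Set.ofList cs.flatten := by
  induction cs using List.reverseRecOn with
  | nil => rfl
  | append_singleton cs c ih =>
    unfold pvState at ih ⊢
    rw [List.foldl_append, List.foldl_cons, List.foldl_nil]
    unfold pvOuter at ih ⊢
    rw [pvF_eq] at ih ⊢
    rw [PySem.Dict.keys_foldl_insert_key, ih]
    have hitems : (PySem.Dict.counter c).items.map Prod.fst = PySem.Set.ofList c := by
      simp [PySem.Dict.items_counter, List.map_map, Function.comp_def]
    rw [hitems, pvUpdate_ofList, List.flatten_append, PySem.Set.ofList_append]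
    simp [PySem.Set.update]

-- items of a dict with Nodup keys, as a map over its keys
lemma pvItems_eq_keys_map {ν : Type} (d : PySem.Dict Int ν) (dflt : ν) (h : d.keys.Nodup) :
    d.items = d.keys.map (fun k => (k, (d.get? k).getD dflt)) := by
  have hk : d.keys = d.items.map Prod.fst := by simp [PySem.Dict.keys]
  rw [hk, List.map_map]
  symm
  have : ∀ p ∈ d.items, ((fun k => (k, (d.get? k).getD dflt)) ∘ Prod.fst) p = id p := by
    intro p hp
    have : d.get? p.1 = some p.2 := PySem.Dict.get?_of_mem_items d (by simpa using hp) h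
    simp [this]
  rw [List.map_congr_left this, List.map_id]

-- A's accumulation loop over a fresh-key Nodup list
lemma pvFoldA (l : List Int) (d : PySem.Dict Int Int) (p : Int → Bool) (f : Int → Int)
    (hnd : l.Nodup) (hfresh : ∀ v ∈ l, d.contains v = false) :
    (l.foldl (fun acc v => if p v then acc.insert v (f v) else acc) d).items
      = d.items ++ (l.filter p).map (fun v => (v, f v)) := by
  induction l generalizing d with
  | nil => simp
  | cons x xs ih =>
    rcases List.nodup_cons.mp hnd with ⟨hx, hnd2⟩
    rw [List.foldl_cons]
    by_cases hp : p x
    · rw [if_pos hp]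
      have hc : d.contains x = false := hfresh x (List.mem_cons_self ..)
      have hfresh2 : ∀ v ∈ xs, (d.insert x (f x)).contains v = false := by
        intro v hv
        rw [PySem.Dict.contains_insert]
        have hne : v ≠ x := fun e => hx (e ▸ hv)
        simp [hne, hfresh v (List.mem_cons_of_mem _ hv)]
      rw [ih _ hnd2 hfresh2, PySem.Dict.items_insert_of_not_contains _ _ hc]
      simp [hp]
    · rw [if_neg hp, ih _ hnd2 (fun v hv => hfresh v (List.mem_cons_of_mem _ hv))]
      simp [hp]

-- the per-combo count lists both programs reason about
def pvMs (combos : List (List Int)) (v : Int) : List Int :=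
  combos.map (fun c => (c.count v : Int))

def pvPA (combos : List (List Int)) (avail : List Int) (v : Int) : Bool :=
  (PySem.Set.len (PySem.Set.ofList (pvMs combos v)) == 1)
    && (decide ((pvMs combos v).headD 0 > 0)
        && ((pvMs combos v).headD 0 == (avail.count v : Int)))

def pvFA (combos : List (List Int)) (v : Int) : Int := (pvMs combos v).headD 0

def pvPB (combos : List (List Int)) (avail : List Int) (v : Int) : Bool :=
  let st := (pvStSpec (pvOcc combos v)).getD (0, 0, false)
  st.2.2 && (st.2.1 == (combos.length : Int)) && (st.1 == (avail.count v : Int))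

def pvFB (combos : List (List Int)) (v : Int) : Int :=
  ((pvStSpec (pvOcc combos v)).getD (0, 0, false)).1

lemma pvIfAnd {α : Sort _} (b1 b2 : Bool) (x y : α) :
    (if b1 then (if b2 then x else y) else y) = if b1 && b2 then x else y := by
  cases b1 <;> cases b2 <;> simp

lemma pvA_char (combos : List (List Int)) (avail : List Int) (hc : combos ≠ []) :
    get_essential_values_with_counts combos avail =
      ((PySem.Set.ofList combos.flatten).filter (pvPA combos avail)).map
        (fun v => (v, pvFA combos v)) := by
  simp only [get_essential_values_with_counts, if_neg hc]
  rw [pvAllN_eq]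
  have hstep : (fun (acc : PySem.Dict Int Int) value =>
      if PySem.Set.len (PySem.Set.ofList ((combos.map PySem.Dict.counter).map (fun c => c.getD value 0))) == 1 then
        if decide (((combos.map PySem.Dict.counter).map (fun c => c.getD value 0)).headD 0 > 0)
            && (((combos.map PySem.Dict.counter).map (fun c => c.getD value 0)).headD 0
                == (PySem.Dict.counter avail).getD value 0) then
          acc.insert value (((combos.map PySem.Dict.counter).map (fun c => c.getD value 0)).headD 0)
        else acc
      else acc)
      = (fun (acc : PySem.Dict Int Int) value =>
          if pvPA combos avail value then acc.insert value (pvFA combos value) else acc) := by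
    funext acc value
    have hm : (combos.map PySem.Dict.counter).map (fun c => c.getD value 0) = pvMs combos value := by
      simp [pvMs, List.map_map, Function.comp_def, PySem.Dict.getD_counter]
    rw [hm, PySem.Dict.getD_counter]
    unfold pvPA pvFA
    exact pvIfAnd _ _ _ _
  rw [hstep, pvFoldA _ _ _ _ (PySem.Set.nodup_ofList _) (fun v _ => PySem.Dict.contains_empty v)]
  rfl

lemma pvB_char (combos : List (List Int)) (avail : List Int) (hc : combos ≠ []) :
    get_essential_values_with_counts_alt combos avail =
      ((PySem.Set.ofList combos.flatten).filter (pvPB combos avail)).map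
        (fun v => (v, pvFB combos v)) := by
  simp only [get_essential_values_with_counts_alt, if_neg hc]
  have hstate : (combos.foldl (fun (st : PySem.Dict Int (Int × Int × Bool)) combo =>
      (PySem.Dict.counter combo).items.foldl (fun st vc =>
        match st.get? vc.1 with
        | none => st.insert vc.1 (vc.2, 1, true)
        | some st0 => st.insert vc.1 (st0.1, st0.2.1 + 1, st0.2.2 && (st0.1 == vc.2))) st)
        PySem.Dict.empty) = pvState combos := rfl
  rw [hstate]
  rw [PySem.List.foldl_append_if
    (fun (it : Int × Int × Int × Bool) =>
      it.2.2.2 && (it.2.2.1 == (combos.length : Int)) && (it.2.1 == (PySem.Dict.counter avail).getD it.1 0))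
    (fun it => (it.1, it.2.1))]
  rw [List.nil_append]
  have hnd : (pvState combos).keys.Nodup := by
    rw [pvState_keys]; exact PySem.Set.nodup_ofList _
  rw [pvItems_eq_keys_map _ (0, 0, false) hnd, pvState_keys]
  rw [List.filter_map, List.map_map]
  have hp : ∀ v, ((fun (it : Int × Int × Int × Bool) =>
        it.2.2.2 && (it.2.2.1 == (combos.length : Int)) && (it.2.1 == (PySem.Dict.counter avail).getD it.1 0))
      ∘ (fun k => (k, ((pvState combos).get? k).getD (0, 0, false)))) v = pvPB combos avail v := by
    intro v
    simp only [Function.comp_apply, pvState_get?, pvPB, PySem.Dict.getD_counter]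
  have hf : ∀ v, ((fun (it : Int × Int × Int × Bool) => (it.1, it.2.1))
      ∘ (fun k => (k, ((pvState combos).get? k).getD (0, 0, false)))) v = (v, pvFB combos v) := by
    intro v
    simp only [Function.comp_apply, pvState_get?, pvFB]
  rw [funext hp, funext hf]

lemma pvSetLen_one (m : Int) (t : List Int) :
    (PySem.Set.len (PySem.Set.ofList (m :: t)) == 1) = t.all (fun x => x == m) := by
  apply Bool.eq_iff_iff.mpr
  rw [PySem.Set.ofList_cons]
  simp only [PySem.Set.len, List.all_eq_true, beq_iff_eq, List.length_cons]
  constructor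
  · intro h x hx
    have hd : (PySem.Set.ofList t).discard m = [] := by
      have : ((PySem.Set.ofList t).discard m).length = 0 := by omega
      exact List.eq_nil_of_length_eq_zero this
    by_contra hne
    have : x ∈ (PySem.Set.ofList t).discard m :=
      (PySem.Set.mem_discard _ _ _).mpr ⟨(PySem.Set.mem_ofList _ _).mpr hx, hne⟩
    rw [hd] at this
    simp at this
  · intro h
    have hd : (PySem.Set.ofList t).discard m = [] := by
      apply List.eq_nil_iff_forall_not_mem.mpr
      intro x hx
      rcases (PySem.Set.mem_discard _ _ _).mp hx with ⟨hxt, hne⟩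
      exact hne (h x ((PySem.Set.mem_ofList _ _).mp hxt))
    rw [hd]
    rfl

lemma pvPoint (combos : List (List Int)) (avail : List Int) (v : Int)
    (hv : v ∈ combos.flatten) :
    pvPA combos avail v = pvPB combos avail v ∧
      (pvPA combos avail v = true → pvFA combos v = pvFB combos v) := by
  obtain ⟨c, cs, rfl⟩ : ∃ c cs, combos = c :: cs := by
    cases combos with
    | nil => simp at hv
    | cons c cs => exact ⟨c, cs, rfl⟩
  have hms : pvMs (c :: cs) v = (c.count v : Int) :: cs.map (fun l => (l.count v : Int)) := rfl
  by_cases hall : ∀ l ∈ cs, (l.count v : Int) = (c.count v : Int)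
  · -- every combo has the same multiplicity of v; it is positive since v occurs somewhere
    have hpos : 0 < c.count v := by
      rcases List.mem_flatten.mp hv with ⟨l, hl, hvl⟩
      have hlc : 0 < l.count v := List.count_pos_iff.mpr hvl
      rcases List.mem_cons.mp hl with rfl | hl
      · exact hlc
      · have h2 : l.count v = c.count v := by exact_mod_cast hall l hl
        omega
    have hmem : ∀ l ∈ c :: cs, v ∈ l := by
      intro l hl
      rcases List.mem_cons.mp hl with rfl | hl
      · exact List.count_pos_iff.mp hpos
      · apply List.count_pos_iff.mp
        have h2 : l.count v = c.count v := by exact_mod_cast hall l hl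
        omega
    have hfl : (c :: cs).filter (fun l => decide (v ∈ l)) = c :: cs :=
      List.filter_eq_self.mpr (fun l hl => decide_eq_true (hmem l hl))
    have hocc : pvOcc (c :: cs) v = pvMs (c :: cs) v := by
      unfold pvOcc pvMs; rw [hfl]
    constructor
    · apply Bool.eq_iff_iff.mpr
      unfold pvPA pvPB
      rw [hocc, hms, pvSetLen_one]
      simp only [pvStSpec, Option.getD_some, Bool.and_eq_true, List.all_eq_true, beq_iff_eq,
        decide_eq_true_eq, List.length_map, List.length_cons, List.mem_map, List.headD_cons]
      constructor
      · rintro ⟨h1, _, h3⟩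
        refine ⟨⟨fun x hx => (h1 x hx).symm, by push_cast; ring⟩, h3⟩
      · rintro ⟨⟨h1, _⟩, h3⟩
        exact ⟨fun x hx => (h1 x hx).symm, by exact_mod_cast hpos, h3⟩
    · intro _
      unfold pvFA pvFB
      rw [hocc, hms]
      simp [pvStSpec]
  · have hAfalse : pvPA (c :: cs) avail v = false := by
      apply Bool.eq_false_iff.mpr
      intro hA
      apply hall
      unfold pvPA at hA
      rw [hms, pvSetLen_one] at hA
      have h1 := Bool.and_elim_left hA
      intro l hl
      exact beq_iff_eq.mp (List.all_eq_true.mp h1 _ (List.mem_map_of_mem hl))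
    have hBfalse : pvPB (c :: cs) avail v = false := by
      apply Bool.eq_false_iff.mpr
      intro hB
      apply hall
      unfold pvPB at hB
      cases hocc : pvOcc (c :: cs) v with
      | nil => rw [hocc] at hB; simp [pvStSpec] at hB
      | cons h t =>
        rw [hocc] at hB
        simp only [pvStSpec, Option.getD_some] at hB
        have hB1 := Bool.and_elim_left hB
        have hok := Bool.and_elim_left hB1
        have hseen := Bool.and_elim_right hB1
        have hseen' : (1 : Int) + (t.length : Int) = ((c :: cs).length : Int) :=
          beq_iff_eq.mp hseen
        have hlen1 : (pvOcc (c :: cs) v).length = (c :: cs).length := by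
          rw [hocc]
          simp only [List.length_cons] at hseen' ⊢
          omega
        have hlen2 : (pvOcc (c :: cs) v).length
            = ((c :: cs).filter (fun l => decide (v ∈ l))).length := by
          unfold pvOcc; rw [List.length_map]
        have hfl : (c :: cs).filter (fun l => decide (v ∈ l)) = c :: cs :=
          List.filter_sublist.eq_of_length (by omega)
        have hocc2 : (h : Int) :: t = pvMs (c :: cs) v := by
          rw [← hocc]; unfold pvOcc pvMs; rw [hfl]
        rw [hms] at hocc2
        rcases List.cons.injEq .. ▸ hocc2 with ⟨hh, ht⟩
        intro l hl
        have hx : (l.count v : Int) ∈ t := ht ▸ List.mem_map_of_mem hl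
        have := beq_iff_eq.mp (List.all_eq_true.mp hok _ hx)
        rw [← this, hh]
    refine ⟨by rw [hAfalse, hBfalse], fun h => absurd h (by simp [hAfalse])⟩

-- ===== VERDICT (by name: the statement is the Claim_ definition above) =====
theorem get_essential_values_with_counts_spec : Claim_equal_get_essential_values_with_counts := by
  intro combos avail _dom
  unfold Spec_get_essential_values_with_counts
  by_cases hc : combos = []
  · simp [get_essential_values_with_counts, get_essential_values_with_counts_alt, hc]
  rw [pvA_char combos avail hc, pvB_char combos avail hc]
  have hfil : (PySem.Set.ofList combos.flatten).filter (pvPA combos avail)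
      = (PySem.Set.ofList combos.flatten).filter (pvPB combos avail) := by
    apply List.filter_congr
    intro v hvs
    exact (pvPoint combos avail v ((PySem.Set.mem_ofList _ _).mp hvs)).1
  rw [← hfil]
  apply List.map_congr_left
  intro v hvf
  rcases List.mem_filter.mp hvf with ⟨hvs, hpa⟩
  rw [(pvPoint combos avail v ((PySem.Set.mem_ofList _ _).mp hvs)).2 hpa]
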